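-- pv_equiv track=rewrite | github.com/BorgwardtLab/MultimodalAMR | multimodal_amr/models/data_utils.py | sum_solver
-- ===== SOURCE A (Python) =====
-- def sum_solver(arr, target_sum):
--     # Find the elements in an array that most closely approximate the desired sum
--     possible_sums = {}
--     records = []
--     for i in range(len(arr)):
--         possible_sums = {**possible_sums, **{arr[i] + s: i for s in possible_sums}}
--         possible_sums[arr[i]] = i
--         records.append(possible_sums)
--
--     best_sum = max(s for s in possible_sums if s <= target_sum)
--     record_idx = len(arr) - 1
--     res = []
--     while best_sum:
--         last_idx = records[record_idx][best_sum]
--         res.append(last_idx)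
--         best_sum -= arr[last_idx]
--         record_idx = last_idx - 1
--     return res
-- ===== SOURCE B (Python) =====
-- def sum_solver(arr, target_sum):
--     # Same forward DP, but each achievable sum maps to the full index list that
--     # forms it, so no per-step snapshots and no backward reconstruction loop.
--     possible_sums = {}
--     for i, x in enumerate(arr):
--         updates = {x + s: ids + [i] for s, ids in possible_sums.items()}
--         possible_sums.update(updates)
--         possible_sums[x] = [i]
--     best_sum = max(s for s in possible_sums if s <= target_sum)
--     if best_sum == 0:
--         return []
--     return list(reversed(possible_sums[best_sum]))
-- ===== Notes on version B (the rewrite author's own statement) =====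
-- stated objective: simpler
-- what changed: B keeps a single forward dict mapping each achievable sum to the full index list that forms it, eliminating A's per-step records snapshots and the backward while-loop reconstruction (the answer is just possible_sums[best_sum] reversed).
import Mathlib
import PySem

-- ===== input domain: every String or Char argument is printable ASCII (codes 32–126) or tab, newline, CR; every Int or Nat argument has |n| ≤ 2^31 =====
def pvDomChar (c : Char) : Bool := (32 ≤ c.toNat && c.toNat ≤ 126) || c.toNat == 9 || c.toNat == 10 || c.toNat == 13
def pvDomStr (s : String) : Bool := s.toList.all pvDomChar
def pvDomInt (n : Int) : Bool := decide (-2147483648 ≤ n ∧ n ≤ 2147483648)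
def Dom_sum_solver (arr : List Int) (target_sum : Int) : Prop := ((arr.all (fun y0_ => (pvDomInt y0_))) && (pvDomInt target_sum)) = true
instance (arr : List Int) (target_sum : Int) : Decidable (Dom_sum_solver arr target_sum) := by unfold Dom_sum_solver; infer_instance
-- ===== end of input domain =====

-- B drops A's per-step `records` snapshots and backward while-loop by storing, for each
-- achievable sum, the full index list that forms it (objective: simpler decomposition).

-- ===== PORT A =====
-- possible_sums = {**possible_sums, **{arr[i]+s: i for s in possible_sums}}; possible_sums[arr[i]] = i
def aStep (d : PySem.Dict Int Int) (i : Int) (x : Int) : PySem.Dict Int Int :=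
  let merged := d.keys.foldl (fun acc s => acc.insert (x + s) i) d
  merged.insert x i

-- the for-loop of A: running dict and the list of per-step snapshots
def aLoop (arr : List Int) : PySem.Dict Int Int × List (PySem.Dict Int Int) :=
  (PySem.List.enumerate arr).foldl
    (fun st p =>
      let d2 := aStep st.1 p.1 p.2
      (d2, st.2 ++ [d2]))
    (PySem.Dict.empty, [])

-- the backward `while best_sum:` reconstruction; fuel = len(arr) bounds the loop
-- (record_idx strictly decreases).  The `none` fall-throughs are Python's
-- IndexError/KeyError sites, unreachable when best_sum is an achievable sum.
def aRecon (arr : List Int) (records : List (PySem.Dict Int Int)) :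
    Nat → Int → Int → List Int → List Int
  | 0, _, _, res => res
  | fuel+1, best, ridx, res =>
    if best = 0 then res
    else
      match PySem.List.pyGet? records ridx with
      | none => res
      | some d =>
        match d.get? best with
        | none => res
        | some v =>
          match PySem.List.pyGet? arr v with
          | none => res
          | some a => aRecon arr records fuel (best - a) (v - 1) (res ++ [v])

def sum_solver (arr : List Int) (target_sum : Int) : List Int :=
  let st := aLoop arr
  match PySem.List.max? (st.1.keys.filter (fun s => decide (s ≤ target_sum))) (fun s => s) with
  | none => []   -- Python: max() of empty generator raises ValueError (excluded by Pre_)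
  | some best => aRecon arr st.2 arr.length best (PySem.List.len arr - 1) []

-- ===== PORT B =====
-- updates = {x + s: ids + [i] for s, ids in possible_sums.items()}; update; possible_sums[x] = [i]
def bStep (d : PySem.Dict Int (List Int)) (i : Int) (x : Int) : PySem.Dict Int (List Int) :=
  let merged := d.items.foldl (fun acc p => acc.insert (x + p.1) (p.2 ++ [i])) d
  merged.insert x [i]

def bLoop (arr : List Int) : PySem.Dict Int (List Int) :=
  (PySem.List.enumerate arr).foldl (fun d p => bStep d p.1 p.2) PySem.Dict.empty

def sum_solver_alt (arr : List Int) (target_sum : Int) : List Int :=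
  let possible := bLoop arr
  match PySem.List.max? (possible.keys.filter (fun s => decide (s ≤ target_sum))) (fun s => s) with
  | none => []   -- Python: max() of empty generator raises ValueError (excluded by Pre_)
  | some best =>
    if best = 0 then []
    else ((possible.get? best).getD []).reverse

-- ===== PRECONDITION & SPEC =====
-- Pre_ excludes exactly the inputs where A's `max()` raises ValueError: the empty list,
-- and lists with no nonempty subset summing to ≤ target_sum (minimal achievable subset
-- sum = sum of the negative elements if any, else the least element).
def Pre_sum_solver (arr : List Int) (target_sum : Int) : Prop :=
  arr ≠ [] ∧
    ((arr.filter (fun x => decide (x < 0)) ≠ [] ∧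
        (arr.filter (fun x => decide (x < 0))).sum ≤ target_sum) ∨
      (∃ x ∈ arr, 0 ≤ x ∧ x ≤ target_sum))
instance (arr : List Int) (target_sum : Int) : Decidable (Pre_sum_solver arr target_sum) := by unfold Pre_sum_solver; infer_instance

def pvWitness_sum_solver : List Int × Int := ([3, -2, 5], 6)

def Spec_sum_solver (arr : List Int) (target_sum : Int) (out : List Int) : Prop := out = sum_solver_alt arr target_sum
instance (arr : List Int) (target_sum : Int) (out : List Int) : Decidable (Spec_sum_solver arr target_sum out) := by unfold Spec_sum_solver; infer_instance

-- ===== CLAIM (what is proved, stated in full; the proofs are below) =====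
def Claim_equal_sum_solver : Prop := ∀ (arr : List Int) (target_sum : Int), Dom_sum_solver arr target_sum → Pre_sum_solver arr target_sum → Spec_sum_solver arr target_sum (sum_solver arr target_sum)

-- ===== LEMMAS AND PROOFS =====
-- ===== helper state definitions (proof-only) =====
def Astate (arr : List Int) : PySem.Dict Int Int :=
  (PySem.List.enumerate arr).foldl (fun d p => aStep d p.1 p.2) PySem.Dict.empty

def Bstate (arr : List Int) : PySem.Dict Int (List Int) :=
  (PySem.List.enumerate arr).foldl (fun d p => bStep d p.1 p.2) PySem.Dict.empty

lemma Bstate_eq_bLoop (arr : List Int) : Bstate arr = bLoop arr := rfl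

lemma Astate_append (ys : List Int) (x : Int) :
    Astate (ys ++ [x]) = aStep (Astate ys) (ys.length : Int) x := by
  simp [Astate, PySem.List.enumerate_append, PySem.List.enumerate_cons,
    PySem.List.enumerate_nil, List.foldl_append]

lemma Bstate_append (ys : List Int) (x : Int) :
    Bstate (ys ++ [x]) = bStep (Bstate ys) (ys.length : Int) x := by
  simp [Bstate, PySem.List.enumerate_append, PySem.List.enumerate_cons,
    PySem.List.enumerate_nil, List.foldl_append]

lemma aLoop_eq (arr : List Int) :
    aLoop arr = (Astate arr, (List.range arr.length).map fun j => Astate (arr.take (j+1))) := by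
  induction arr using List.reverseRecOn with
  | nil => rfl
  | append_singleton ys x ih =>
    simp only [aLoop, PySem.List.enumerate_append, PySem.List.enumerate_cons,
      PySem.List.enumerate_nil, List.foldl_append, List.foldl_cons, List.foldl_nil,
      zero_add] at ih ⊢
    rw [ih]
    simp only [List.length_append, List.length_cons, List.length_nil, List.range_succ,
      List.map_append, List.map_cons, List.map_nil, Prod.mk.injEq]
    refine ⟨by rw [Astate_append], ?_⟩
    congr 1
    · refine List.map_congr_left fun j hj => ?_
      simp only [List.mem_range] at hj
      rw [List.take_append_of_le_length (by omega)]
    · rw [List.take_of_length_le (by simp), Astate_append]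

-- ===== merge-fold lookup characterizations =====
lemma get?_foldA (x i q : Int) :
    ∀ (l : List Int) (acc : PySem.Dict Int Int),
      (l.foldl (fun acc s => acc.insert (x + s) i) acc).get? q =
        if q - x ∈ l then some i else acc.get? q := by
  intro l
  induction l with
  | nil => intro acc; simp
  | cons s l ih =>
    intro acc
    rw [List.foldl_cons, ih]
    by_cases hmem : q - x ∈ l
    · simp [hmem]
    · by_cases hs : q - x = s
      · have hq : q = x + s := by omega
        simp [hq, PySem.Dict.get?_insert_self]
      · have hne : q ≠ x + s := by omega
        simp [hmem, hs, PySem.Dict.get?_insert_of_ne acc i hne]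

lemma get?_foldB (x : Int) (i q : Int) :
    ∀ (l : List (Int × List Int)) (acc : PySem.Dict Int (List Int)),
      (l.map Prod.fst).Nodup →
      (l.foldl (fun acc p => acc.insert (x + p.1) (p.2 ++ [i])) acc).get? q =
        match l.find? (fun p => p.1 == q - x) with
        | some p => some (p.2 ++ [i])
        | none => acc.get? q := by
  intro l
  induction l with
  | nil => intro acc _; simp
  | cons p l ih =>
    intro acc hnd
    simp only [List.map_cons, List.nodup_cons] at hnd
    rw [List.foldl_cons, ih _ hnd.2]
    by_cases hp : p.1 = q - x
    · have hq : q = x + p.1 := by omega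
      have hfind : l.find? (fun r => r.1 == q - x) = none := by
        rw [List.find?_eq_none]
        intro r hr
        simp only [beq_iff_eq]
        intro hrq
        exact hnd.1 (hp ▸ hrq ▸ List.mem_map_of_mem hr)
      have hcond : (p.1 == q - x) = true := by simpa using hp
      simp only [List.find?_cons, hcond, hfind]
      rw [hq, PySem.Dict.get?_insert_self]
    · have hne : q ≠ x + p.1 := by omega
      cases hfind : l.find? (fun r => r.1 == q - x) with
      | some r => simp [hp, hfind]
      | none => simp [hp, hfind, PySem.Dict.get?_insert_of_ne acc (p.2 ++ [i]) hne]

lemma dict_get?_eq_find? {ν : Type} (d : PySem.Dict Int ν) (hnd : d.keys.Nodup) (k : Int) :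
    d.get? k = (d.items.find? (fun p => p.1 == k)).map Prod.snd := by
  cases hfind : d.items.find? (fun p => p.1 == k) with
  | some p =>
    have hmem := List.mem_of_find?_eq_some hfind
    have hk : p.1 = k := by simpa using List.find?_some hfind
    have hget : d.get? p.1 = some p.2 :=
      (PySem.Dict.get?_eq_some_iff_mem_items d p.1 p.2 hnd).mpr (by simpa using hmem)
    rw [hk] at hget
    simp [hget]
  | none =>
    rw [List.find?_eq_none] at hfind
    have hk : k ∉ d.keys := by
      intro hk
      simp only [PySem.Dict.keys] at hk
      obtain ⟨p, hp, hpk⟩ := List.mem_map.mp hk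
      exact absurd (by simpa using hpk) (by simpa using hfind p hp)
    have : d.contains k = false := by
      rw [PySem.Dict.contains_eq_decide_mem_keys]
      simpa using hk
    simp [(PySem.Dict.get?_eq_none_iff_contains d k).mpr this]

-- ===== per-step lookup characterizations =====
lemma get?_aStep (d : PySem.Dict Int Int) (i x q : Int) :
    (aStep d i x).get? q =
      if q = x then some i
      else if q - x ∈ d.keys then some i else d.get? q := by
  unfold aStep
  by_cases hq : q = x
  · simp [hq, PySem.Dict.get?_insert_self]
  · rw [PySem.Dict.get?_insert_of_ne _ i hq, get?_foldA]
    simp [hq]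

lemma get?_bStep (d : PySem.Dict Int (List Int)) (hnd : d.keys.Nodup) (i x q : Int) :
    (bStep d i x).get? q =
      if q = x then some [i]
      else match d.get? (q - x) with
        | some ls => some (ls ++ [i])
        | none => d.get? q := by
  unfold bStep
  by_cases hq : q = x
  · simp [hq, PySem.Dict.get?_insert_self]
  · rw [PySem.Dict.get?_insert_of_ne _ [i] hq,
      get?_foldB x i q d.items d (by simpa [PySem.Dict.keys] using hnd),
      dict_get?_eq_find? d hnd (q - x)]
    cases d.items.find? (fun p => p.1 == q - x) <;> simp [hq]

-- ===== keys: equal on both sides, and Nodup =====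
lemma keys_insert_eq_add {ν : Type} (d : PySem.Dict Int ν) (k : Int) (v : ν) :
    (d.insert k v).keys = PySem.Set.add d.keys k := by
  by_cases h : d.contains k = true
  · rw [PySem.Dict.keys_insert_of_contains d v h,
      PySem.Set.add_of_mem (by rwa [PySem.Dict.contains_eq_decide_mem_keys, decide_eq_true_iff] at h)]
  · rw [PySem.Dict.keys_insert_of_not_contains d v (by simpa using h),
      PySem.Set.add_of_not_mem (by rwa [PySem.Dict.contains_eq_decide_mem_keys, decide_eq_true_iff] at h)]

lemma keys_aStep (d : PySem.Dict Int Int) (i x : Int) :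
    (aStep d i x).keys =
      PySem.Set.add (PySem.Set.update d.keys (d.keys.map (fun s => x + s))) x := by
  unfold aStep
  rw [keys_insert_eq_add,
    PySem.Dict.keys_foldl_insert_key d.keys (fun s => x + s) (fun _ _ => i) d]

lemma keys_bStep (d : PySem.Dict Int (List Int)) (i x : Int) :
    (bStep d i x).keys =
      PySem.Set.add (PySem.Set.update d.keys (d.keys.map (fun s => x + s))) x := by
  unfold bStep
  rw [keys_insert_eq_add,
    PySem.Dict.keys_foldl_insert_key d.items (fun p => x + p.1) (fun _ p => p.2 ++ [i]) d]
  simp [PySem.Dict.keys, List.map_map, Function.comp_def]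

lemma keysAB (arr : List Int) : (Bstate arr).keys = (Astate arr).keys := by
  induction arr using List.reverseRecOn with
  | nil => rfl
  | append_singleton ys x ih =>
    rw [Astate_append, Bstate_append, keys_aStep, keys_bStep, ih]

lemma nodupA (arr : List Int) : (Astate arr).keys.Nodup := by
  induction arr using List.reverseRecOn with
  | nil => simp [Astate, PySem.List.enumerate_nil]
  | append_singleton ys x ih =>
    rw [Astate_append, keys_aStep]
    exact PySem.Set.nodup_add _ _ (PySem.Set.nodup_update _ _ ih)

-- ===== the chain invariant: each A-entry's reconstruction data matches B's stored list =====
lemma entry_chain (arr : List Int) :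
    ∀ (k : Nat), k ≤ arr.length → ∀ s v, (Astate (arr.take k)).get? s = some v →
      ∃ (j : Nat) (a : Int), v = (j : Int) ∧ j < k ∧ arr[j]? = some a ∧
        ∃ l, (Bstate (arr.take k)).get? s = some l ∧
          ((s = a ∧ l = [(j : Int)]) ∨
            (s ≠ a ∧ ∃ v' l', (Astate (arr.take j)).get? (s - a) = some v' ∧
              (Bstate (arr.take j)).get? (s - a) = some l' ∧ l = l' ++ [(j : Int)])) := by
  intro k
  induction k with
  | zero =>
    intro _ s v h
    simp [Astate, PySem.List.enumerate_nil] at h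
  | succ k ih =>
    intro hk s v h
    have hk' : k < arr.length := by omega
    have htake : arr.take (k+1) = arr.take k ++ [arr[k]] := by
      rw [List.take_add_one, List.getElem?_eq_getElem hk']; rfl
    have hlen : ((arr.take k).length : Int) = (k : Int) := by
      simp [List.length_take]; omega
    have hndB : (Bstate (arr.take k)).keys.Nodup := keysAB (arr.take k) ▸ nodupA (arr.take k)
    have hAstep : Astate (arr.take (k+1)) = aStep (Astate (arr.take k)) (k : Int) arr[k] := by
      rw [htake, Astate_append, hlen]
    have hBstep : Bstate (arr.take (k+1)) = bStep (Bstate (arr.take k)) (k : Int) arr[k] := by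
      rw [htake, Bstate_append, hlen]
    rw [hAstep, get?_aStep] at h
    by_cases hs : s = arr[k]
    · rw [if_pos hs] at h
      refine ⟨k, arr[k], by simpa using h.symm, by omega, List.getElem?_eq_getElem hk', [(k : Int)], ?_, Or.inl ⟨hs, rfl⟩⟩
      rw [hBstep, get?_bStep _ hndB, if_pos hs]
    · rw [if_neg hs] at h
      by_cases hmem : s - arr[k] ∈ (Astate (arr.take k)).keys
      · rw [if_pos hmem] at h
        have hgA : (Astate (arr.take k)).get? (s - arr[k]) ≠ none := fun hnone =>
          ((PySem.Dict.get?_eq_none_iff_not_mem_keys _ _).mp hnone) hmem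
        obtain ⟨v', hv'⟩ := Option.ne_none_iff_exists'.mp hgA
        have hgB : (Bstate (arr.take k)).get? (s - arr[k]) ≠ none := fun hnone =>
          ((PySem.Dict.get?_eq_none_iff_not_mem_keys _ _).mp hnone) (keysAB (arr.take k) ▸ hmem)
        obtain ⟨l', hl'⟩ := Option.ne_none_iff_exists'.mp hgB
        refine ⟨k, arr[k], by simpa using h.symm, by omega, List.getElem?_eq_getElem hk',
          l' ++ [(k : Int)], ?_, Or.inr ⟨hs, v', l', hv', hl', rfl⟩⟩
        rw [hBstep, get?_bStep _ hndB, if_neg hs, hl']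
      · rw [if_neg hmem] at h
        obtain ⟨j, a, hv, hj, ha, l, hB, hdisj⟩ := ih (by omega) s v h
        refine ⟨j, a, hv, by omega, ha, l, ?_, hdisj⟩
        have hgB : (Bstate (arr.take k)).get? (s - arr[k]) = none :=
          (PySem.Dict.get?_eq_none_iff_not_mem_keys _ _).mpr (keysAB (arr.take k) ▸ hmem)
        rw [hBstep, get?_bStep _ hndB, if_neg hs, hgB, hB]

lemma aRecon_zero (arr : List Int) (records : List (PySem.Dict Int Int)) :
    ∀ fuel ridx res, aRecon arr records fuel 0 ridx res = res := by
  intro fuel ridx res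
  cases fuel <;> simp [aRecon]

lemma records_get (arr : List Int) (k : Nat) (h1 : 1 ≤ k) (h2 : k ≤ arr.length) :
    PySem.List.pyGet? ((List.range arr.length).map fun j => Astate (arr.take (j+1))) ((k : Int) - 1)
      = some (Astate (arr.take k)) := by
  have hcast : (k : Int) - 1 = ((k - 1 : Nat) : Int) := by omega
  rw [hcast, PySem.List.pyGet?_natCast, List.getElem?_map,
    List.getElem?_range (show k - 1 < arr.length by omega)]
  have hsucc : k - 1 + 1 = k := by omega
  simp [hsucc]

-- ===== backward reconstruction returns B's stored list, reversed =====
lemma recon_eq (arr : List Int) :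
    ∀ (k : Nat), k ≤ arr.length → ∀ s v, (Astate (arr.take k)).get? s = some v → s ≠ 0 →
      ∀ fuel, k ≤ fuel → ∀ res,
        aRecon arr ((List.range arr.length).map fun j => Astate (arr.take (j+1))) fuel s ((k : Int) - 1) res
          = res ++ (((Bstate (arr.take k)).get? s).getD []).reverse := by
  intro k
  induction k using Nat.strong_induction_on with
  | _ k IH =>
    intro hk s v h hs0 fuel hfuel res
    obtain ⟨j, a, hv, hj, ha, l, hB, hdisj⟩ := entry_chain arr k hk s v h
    obtain ⟨fuel', rfl⟩ : ∃ f', fuel = f' + 1 := ⟨fuel - 1, by omega⟩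
    have hstep : aRecon arr ((List.range arr.length).map fun j => Astate (arr.take (j+1))) (fuel' + 1) s ((k : Int) - 1) res
        = aRecon arr ((List.range arr.length).map fun j => Astate (arr.take (j+1))) fuel' (s - a) ((j : Int) - 1) (res ++ [(j : Int)]) := by
      simp only [aRecon, if_neg hs0, records_get arr k (by omega) hk, h, hv,
        PySem.List.pyGet?_natCast, ha]
    rw [hstep]
    rcases hdisj with ⟨hsa, hl⟩ | ⟨hsa, v', l', hA', hB', hl⟩
    · have hza : s - a = 0 := by omega
      rw [hza, aRecon_zero, hB, hl]
      simp
    · rw [IH j hj (by omega) (s - a) v' hA' (by omega) fuel' (by omega) (res ++ [(j : Int)]),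
        hB, hB', hl]
      simp

lemma final_eq (arr : List Int) (target_sum : Int) :
    sum_solver arr target_sum = sum_solver_alt arr target_sum := by
  simp only [sum_solver, sum_solver_alt, aLoop_eq, ← Bstate_eq_bLoop, keysAB]
  cases hmax : PySem.List.max? ((Astate arr).keys.filter fun s => decide (s ≤ target_sum)) (fun s => s) with
  | none => rfl
  | some best =>
    have hmem : best ∈ (Astate arr).keys := List.mem_of_mem_filter (PySem.List.max?_mem hmax)
    by_cases hb : best = 0
    · subst hb
      simp [aRecon_zero]
    · have hne : (Astate arr).get? best ≠ none := fun hnone =>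
        ((PySem.Dict.get?_eq_none_iff_not_mem_keys _ _).mp hnone) hmem
      obtain ⟨v, hv⟩ := Option.ne_none_iff_exists'.mp hne
      have hrec := recon_eq arr arr.length le_rfl best v (by rwa [List.take_length]) hb
        arr.length le_rfl []
      rw [List.take_length] at hrec
      simp [PySem.List.len_eq, hrec, hb]

-- ===== VERDICT (by name: the statement is the Claim_ definition above) =====
theorem sum_solver_spec : Claim_equal_sum_solver := by
  intro arr target_sum _ _
  unfold Spec_sum_solver
  exact final_eq arr target_sum
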